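-- pv_equiv track=rewrite | github.com/BdM-15/proj-theseus | src/query/ontology_context.py | _detect_metadata_focus
-- ===== SOURCE A (Python) =====
-- from typing import List, Optional
--
-- def _detect_metadata_focus(q: str) -> List[str]:
--     focus: List[str] = []
--
--     def add(x: str) -> None:
--         if x not in focus:
--             focus.append(x)
--
--     if any(k in q for k in ["labor", "fte", "staffing", "shift", "coverage", "hours", "workload", "loe", "basis of estimate", "boe"]):
--         add("labor_drivers")
--         add("boe_category")
--     if any(k in q for k in ["materials", "equipment", "supplies", "tools", "gfe", "cfe"]):
--         add("material_needs")
--     if any(k in q for k in ["weight", "points", "%", "importance"]):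
--         add("weight")
--         add("importance")
--     if any(k in q for k in ["criticality", "shall", "must", "should", "may"]):
--         add("criticality")
--         add("modal_verb")
--
--     return focus
-- ===== SOURCE B (Python) =====
-- from typing import List
--
-- # Each tag, in the canonical output order, paired with the keyword list that triggers it.
-- _TAG_TRIGGERS = [
--     ("labor_drivers", ["labor", "fte", "staffing", "shift", "coverage", "hours", "workload", "loe", "basis of estimate", "boe"]),
--     ("boe_category", ["labor", "fte", "staffing", "shift", "coverage", "hours", "workload", "loe", "basis of estimate", "boe"]),
--     ("material_needs", ["materials", "equipment", "supplies", "tools", "gfe", "cfe"]),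
--     ("weight", ["weight", "points", "%", "importance"]),
--     ("importance", ["weight", "points", "%", "importance"]),
--     ("criticality", ["criticality", "shall", "must", "should", "may"]),
--     ("modal_verb", ["criticality", "shall", "must", "should", "may"]),
-- ]
--
-- def _detect_metadata_focus(q: str) -> List[str]:
--     # Select from the canonical tag list instead of accumulating with dedup:
--     # all tags are pairwise distinct, so A's output is exactly this subsequence.
--     return [tag for tag, kws in _TAG_TRIGGERS if any(k in q for k in kws)]
-- ===== Notes on version B (the rewrite author's own statement) =====
-- stated objective: idiomatic
-- what changed: B builds the result by filtering a canonical per-tag trigger table (a pure comprehension, no mutable accumulator, no membership/dedup logic, no nested add closure), relying on the fact that the seven tags are pairwise distinct so A's conditional-append output is exactly this subsequence.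
import Mathlib
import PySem

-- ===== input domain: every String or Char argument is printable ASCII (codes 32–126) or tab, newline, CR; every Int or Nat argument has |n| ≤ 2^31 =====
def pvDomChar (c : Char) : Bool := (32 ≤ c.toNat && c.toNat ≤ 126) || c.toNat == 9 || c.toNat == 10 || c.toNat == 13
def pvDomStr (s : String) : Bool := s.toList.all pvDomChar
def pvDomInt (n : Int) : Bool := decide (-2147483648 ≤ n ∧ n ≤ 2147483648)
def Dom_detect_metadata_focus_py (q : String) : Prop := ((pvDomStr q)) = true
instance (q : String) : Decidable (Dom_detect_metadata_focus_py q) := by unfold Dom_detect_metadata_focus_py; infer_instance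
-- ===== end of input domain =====

-- B filters a canonical per-tag trigger table (pure selection, no accumulator/dedup) instead of A's conditional appends (idiomatic, same cost).


-- ===== PORT A =====
-- the nested add(): append x only if not already present
def pvAdd (focus : List String) (x : String) : List String :=
  if x ∈ focus then focus else focus ++ [x]

def detect_metadata_focus_py (q : String) : List String :=
  let focus : List String := []
  let focus :=
    if (["labor", "fte", "staffing", "shift", "coverage", "hours", "workload", "loe", "basis of estimate", "boe"].any
        (fun k => PySem.Str.isIn k q)) then pvAdd (pvAdd focus "labor_drivers") "boe_category" else focus
  let focus :=
    if (["materials", "equipment", "supplies", "tools", "gfe", "cfe"].any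
        (fun k => PySem.Str.isIn k q)) then pvAdd focus "material_needs" else focus
  let focus :=
    if (["weight", "points", "%", "importance"].any
        (fun k => PySem.Str.isIn k q)) then pvAdd (pvAdd focus "weight") "importance" else focus
  let focus :=
    if (["criticality", "shall", "must", "should", "may"].any
        (fun k => PySem.Str.isIn k q)) then pvAdd (pvAdd focus "criticality") "modal_verb" else focus
  focus

-- ===== PORT B =====
def pvTagTriggers : List (String × List String) :=
  [ ("labor_drivers", ["labor", "fte", "staffing", "shift", "coverage", "hours", "workload", "loe", "basis of estimate", "boe"]),
    ("boe_category", ["labor", "fte", "staffing", "shift", "coverage", "hours", "workload", "loe", "basis of estimate", "boe"]),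
    ("material_needs", ["materials", "equipment", "supplies", "tools", "gfe", "cfe"]),
    ("weight", ["weight", "points", "%", "importance"]),
    ("importance", ["weight", "points", "%", "importance"]),
    ("criticality", ["criticality", "shall", "must", "should", "may"]),
    ("modal_verb", ["criticality", "shall", "must", "should", "may"]) ]

def detect_metadata_focus_py_alt (q : String) : List String :=
  (pvTagTriggers.filter (fun e => e.2.any (fun k => PySem.Str.isIn k q))).map (fun e => e.1)

-- ===== PRECONDITION & SPEC =====
def Spec_detect_metadata_focus_py (q : String) (out : List String) : Prop := out = detect_metadata_focus_py_alt q
instance (q : String) (out : List String) : Decidable (Spec_detect_metadata_focus_py q out) := by unfold Spec_detect_metadata_focus_py; infer_instance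

-- ===== CLAIM (what is proved, stated in full; the proofs are below) =====
def Claim_equal_detect_metadata_focus_py : Prop := ∀ (q : String), Dom_detect_metadata_focus_py q → Spec_detect_metadata_focus_py q (detect_metadata_focus_py q)

-- ===== LEMMAS AND PROOFS =====

-- ===== VERDICT (by name: the statement is the Claim_ definition above) =====
theorem detect_metadata_focus_py_spec : Claim_equal_detect_metadata_focus_py := by
  intro q _
  unfold Spec_detect_metadata_focus_py detect_metadata_focus_py detect_metadata_focus_py_alt pvTagTriggers pvAdd
  cases h1 : (["labor", "fte", "staffing", "shift", "coverage", "hours", "workload", "loe", "basis of estimate", "boe"].any (fun k => PySem.Str.isIn k q)) <;>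
  cases h2 : (["materials", "equipment", "supplies", "tools", "gfe", "cfe"].any (fun k => PySem.Str.isIn k q)) <;>
  cases h3 : (["weight", "points", "%", "importance"].any (fun k => PySem.Str.isIn k q)) <;>
  cases h4 : (["criticality", "shall", "must", "should", "may"].any (fun k => PySem.Str.isIn k q)) <;>
  simp_all [List.filter_cons, List.filter_nil]
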